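-- pv_equiv track=rewrite | github.com/cjmcgill/chemprop | chemprop/models/vp.py | get_vp_parameter_names
-- ===== SOURCE A (Python) =====
-- def get_vp_parameter_names(
--         vp: str,
--         molecule_id: int = None,
-- ):
--     """
--     Get the coefficients for the vapor pressure model. If there are multiple molecules
--     in a mixture for vle prediction, the coefficients are suffixed with the molecule ID.
--     """
--     if vp == "antoine":
--         names = ["antoine_a", "antoine_b", "antoine_c"]
--     elif vp == "four_var":
--         names = ["antoine_a", "antoine_b", "antoine_c", "antoine_d"]
--     elif vp == "five_var":
--         names = ["antoine_a", "antoine_b", "antoine_c", "antoine_d", "antoine_e"]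
--     elif vp == "simplified":
--         names = ["antoine_a", "antoine_b"]
--     elif vp == "ambrose4":
--         names = ["ambrose_a", "ambrose_b", "ambrose_c", "ambrose_d"]
--     elif vp == "ambrose5":
--         names = ["ambrose_a", "ambrose_b", "ambrose_c", "ambrose_d", "ambrose_e"]
--     elif vp == "riedel4":
--         names = ["riedel_a", "riedel_b", "riedel_c", "riedel_d"]
--     elif vp == "riedel5":
--         names = ["riedel_a", "riedel_b", "riedel_c", "riedel_d", "riedel_e"]
--     else:
--         raise NotImplementedError(f"Vapor pressure model {vp} not supported")
--     if molecule_id is not None: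
--         names = [f"{name}_{molecule_id}" for name in names]
--     return names
-- ===== SOURCE B (Python) =====
-- _VP_MODELS = {
--     "antoine": ("antoine", 3),
--     "four_var": ("antoine", 4),
--     "five_var": ("antoine", 5),
--     "simplified": ("antoine", 2),
--     "ambrose4": ("ambrose", 4),
--     "ambrose5": ("ambrose", 5),
--     "riedel4": ("riedel", 4),
--     "riedel5": ("riedel", 5),
-- }
--
--
-- def get_vp_parameter_names(
--         vp: str,
--         molecule_id: int = None,
-- ):
--     """Get the vapor pressure model coefficient names via a (prefix, count) table."""
--     try:
--         prefix, count = _VP_MODELS[vp]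
--     except KeyError:
--         raise NotImplementedError(f"Vapor pressure model {vp} not supported")
--     names = [f"{prefix}_{chr(ord('a') + i)}" for i in range(count)]
--     if molecule_id is not None:
--         names = [f"{name}_{molecule_id}" for name in names]
--     return names
-- ===== Notes on version B (the rewrite author's own statement) =====
-- stated objective: simpler
-- what changed: Replaces the eight-branch if/elif chain of hand-written name lists by a single lookup table mapping each model to a (prefix, count) pair, generating the letter-suffixed names with a comprehension over range(count); the molecule_id suffixing and the NotImplementedError message are unchanged.
import Mathlib
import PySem

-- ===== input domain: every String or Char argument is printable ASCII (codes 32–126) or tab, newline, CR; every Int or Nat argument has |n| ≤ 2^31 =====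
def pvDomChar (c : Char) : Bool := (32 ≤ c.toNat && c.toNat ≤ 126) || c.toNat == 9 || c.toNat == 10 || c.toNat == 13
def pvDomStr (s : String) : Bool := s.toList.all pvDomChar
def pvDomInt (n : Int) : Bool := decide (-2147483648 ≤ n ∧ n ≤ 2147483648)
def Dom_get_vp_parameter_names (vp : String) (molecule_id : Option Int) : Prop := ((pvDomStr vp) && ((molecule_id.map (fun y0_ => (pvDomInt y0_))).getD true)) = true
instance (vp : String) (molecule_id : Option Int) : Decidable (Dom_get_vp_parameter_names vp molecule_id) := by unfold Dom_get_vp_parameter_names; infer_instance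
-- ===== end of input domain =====

-- B replaces A's eight-branch if/elif chain of hand-written name lists by a lookup
-- table of (prefix, count) pairs and generates the letter names from range(count): simpler decomposition.


-- ===== PORT A =====
-- Literal transliteration of A; the `else: raise NotImplementedError` branch returns []
-- and is excluded by Pre_get_vp_parameter_names.
def get_vp_parameter_names (vp : String) (molecule_id : Option Int) : List String :=
  let names : List String :=
    if vp = "antoine" then ["antoine_a", "antoine_b", "antoine_c"]
    else if vp = "four_var" then ["antoine_a", "antoine_b", "antoine_c", "antoine_d"]
    else if vp = "five_var" then ["antoine_a", "antoine_b", "antoine_c", "antoine_d", "antoine_e"]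
    else if vp = "simplified" then ["antoine_a", "antoine_b"]
    else if vp = "ambrose4" then ["ambrose_a", "ambrose_b", "ambrose_c", "ambrose_d"]
    else if vp = "ambrose5" then ["ambrose_a", "ambrose_b", "ambrose_c", "ambrose_d", "ambrose_e"]
    else if vp = "riedel4" then ["riedel_a", "riedel_b", "riedel_c", "riedel_d"]
    else if vp = "riedel5" then ["riedel_a", "riedel_b", "riedel_c", "riedel_d", "riedel_e"]
    else []  -- raise NotImplementedError (outside Pre_)
  match molecule_id with
  | some m => names.map (fun name => name ++ "_" ++ PySem.Int.toStr m)
  | none => names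

-- ===== PORT B =====
-- the (prefix, count) lookup table _VP_MODELS of Source B
def vpModels : PySem.Dict String (String × Int) :=
  PySem.Dict.ofList [("antoine", ("antoine", 3)), ("four_var", ("antoine", 4)), ("five_var", ("antoine", 5)),
   ("simplified", ("antoine", 2)), ("ambrose4", ("ambrose", 4)), ("ambrose5", ("ambrose", 5)),
   ("riedel4", ("riedel", 4)), ("riedel5", ("riedel", 5))]

def get_vp_parameter_names_alt (vp : String) (molecule_id : Option Int) : List String :=
  match PySem.Dict.get? vpModels vp with
  | none => []  -- raise NotImplementedError (outside Pre_)
  | some (pfx, count) =>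
    let names := (PySem.List.pyRange 0 count 1).map
      (fun i => pfx ++ "_" ++ String.singleton (Char.ofNat (97 + i).toNat))
    match molecule_id with
    | some m => names.map (fun name => name ++ "_" ++ PySem.Int.toStr m)
    | none => names

-- ===== PRECONDITION & SPEC =====
-- Pre_ excludes exactly the unknown model names, on which Python A raises NotImplementedError.
def Pre_get_vp_parameter_names (vp : String) (_molecule_id : Option Int) : Prop :=
  vp ∈ ["antoine", "four_var", "five_var", "simplified", "ambrose4", "ambrose5", "riedel4", "riedel5"]
instance (vp : String) (molecule_id : Option Int) : Decidable (Pre_get_vp_parameter_names vp molecule_id) := by unfold Pre_get_vp_parameter_names; infer_instance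
def pvWitness_get_vp_parameter_names : String × Option Int := ("ambrose4", some 2)

def Spec_get_vp_parameter_names (vp : String) (molecule_id : Option Int) (out : List String) : Prop := out = get_vp_parameter_names_alt vp molecule_id
instance (vp : String) (molecule_id : Option Int) (out : List String) : Decidable (Spec_get_vp_parameter_names vp molecule_id out) := by unfold Spec_get_vp_parameter_names; infer_instance

-- ===== CLAIM (what is proved, stated in full; the proofs are below) =====
def Claim_equal_get_vp_parameter_names : Prop := ∀ (vp : String) (molecule_id : Option Int), Dom_get_vp_parameter_names vp molecule_id → Pre_get_vp_parameter_names vp molecule_id → Spec_get_vp_parameter_names vp molecule_id (get_vp_parameter_names vp molecule_id)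

-- ===== LEMMAS AND PROOFS =====

-- Both ports apply the same molecule_id suffix map to their base (molecule_id = none) list.
theorem A_suffix (vp : String) (m : Int) :
    get_vp_parameter_names vp (some m) =
      (get_vp_parameter_names vp none).map (fun name => name ++ "_" ++ PySem.Int.toStr m) := by
  simp only [get_vp_parameter_names]

theorem B_suffix (vp : String) (m : Int) :
    get_vp_parameter_names_alt vp (some m) =
      (get_vp_parameter_names_alt vp none).map (fun name => name ++ "_" ++ PySem.Int.toStr m) := by
  simp only [get_vp_parameter_names_alt]
  cases PySem.Dict.get? vpModels vp with
  | none => rfl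
  | some pc => rfl

-- For each supported model the two ports build the same base name list,
-- so after the (identical) molecule_id suffix map they agree.
theorem base_names_agree (vp : String)
    (h : Pre_get_vp_parameter_names vp none) :
    get_vp_parameter_names vp none = get_vp_parameter_names_alt vp none := by
  simp only [Pre_get_vp_parameter_names, List.mem_cons,
    List.not_mem_nil, or_false] at h
  rcases h with h | h | h | h | h | h | h | h <;> subst h <;> decide

-- ===== VERDICT (by name: the statement is the Claim_ definition above) =====
theorem get_vp_parameter_names_spec : Claim_equal_get_vp_parameter_names := by
  intro vp molecule_id _ hpre
  have hbase := base_names_agree vp hpre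
  unfold Spec_get_vp_parameter_names
  cases molecule_id with
  | none => exact hbase
  | some m => rw [A_suffix, B_suffix, hbase]
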